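-- pv_equiv track=rewrite | github.com/junaidi-ai/med-vllm | tests/medical/test_classification_metrics.py | _majority_label_train
-- ===== SOURCE A (Python) =====
-- from collections import Counter
--
-- def _majority_label_train(rows):
--     # Use deterministic tie-break: lexicographically smallest label among max-count labels
--     train_labels = [r["label"] for r in rows if r.get("split") == "train"]
--     counts = Counter(train_labels)
--     if not counts:
--         raise RuntimeError("No train rows in fixture dataset")
--     max_count = max(counts.values())
--     candidates = sorted([lbl for lbl, cnt in counts.items() if cnt == max_count])
--     return candidates[0]
-- ===== SOURCE B (Python) =====
-- def _majority_label_train(rows):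
--     # sort the train labels once, then a single run-length scan; strict '>' keeps
--     # the lexicographically smallest label among the most frequent ones
--     labels = sorted(r["label"] for r in rows if r.get("split") == "train")
--     if not labels:
--         raise RuntimeError("No train rows in fixture dataset")
--     best = cur = labels[0]
--     best_run = run = 0
--     for lbl in labels:
--         if lbl == cur:
--             run += 1
--         else:
--             cur = lbl
--             run = 1
--         if run > best_run:
--             best = lbl
--             best_run = run
--     return best
-- ===== Notes on version B (the rewrite author's own statement) =====
-- stated objective: alternative
-- what changed: Replaces Counter + max + filter + sort-of-candidates by sorting the train labels once and doing a single run-length scan whose strict '>' update yields the lexicographically-smallest most-frequent label directly.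
import Mathlib
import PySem

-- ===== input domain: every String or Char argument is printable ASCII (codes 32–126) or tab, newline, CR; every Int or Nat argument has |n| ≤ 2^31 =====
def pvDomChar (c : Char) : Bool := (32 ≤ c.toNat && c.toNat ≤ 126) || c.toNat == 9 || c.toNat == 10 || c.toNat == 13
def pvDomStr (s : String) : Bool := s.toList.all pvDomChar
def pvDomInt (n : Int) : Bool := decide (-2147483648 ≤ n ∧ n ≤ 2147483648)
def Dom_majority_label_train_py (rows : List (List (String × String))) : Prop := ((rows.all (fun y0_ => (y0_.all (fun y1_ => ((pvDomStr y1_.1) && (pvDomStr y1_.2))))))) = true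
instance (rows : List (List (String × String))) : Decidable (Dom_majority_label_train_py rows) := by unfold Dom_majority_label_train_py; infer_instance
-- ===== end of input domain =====

-- B replaces Counter + max + filter + sort-of-candidates by one sort of the train labels
-- followed by a single run-length scan (strict '>' keeps the lexicographically smallest
-- label among the most frequent); same result, a different decomposition.

-- ===== PORT A =====
def majority_label_train_py (rows : List (List (String × String))) : String :=
  let train_labels := rows.foldl (fun acc r =>
      if (PySem.Dict.mk r).get? "split" == some "train"
      then acc ++ [(PySem.Dict.mk r).getD "label" ""] else acc) []
  let counts := PySem.Dict.counter train_labels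
  if counts.items = [] then ""   -- raise RuntimeError("No train rows in fixture dataset"): outside Pre_
  else
    let max_count := (PySem.List.max? counts.values (fun v => v)).getD 0
    let candidates := PySem.List.sorted
      (counts.items.foldl (fun acc p => if p.2 == max_count then acc ++ [p.1] else acc) [])
      (fun x => x) false
    candidates.headD ""   -- candidates[0]; candidates is nonempty whenever counts is

-- ===== PORT B =====
-- the loop body of Source B's scan: state = (cur, run, best, best_run)
def pvStep (s : String × Int × String × Int) (lbl : String) : String × Int × String × Int :=
  let s1 := if lbl == s.1 then (s.1, s.2.1 + 1) else (lbl, (1 : Int))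
  if s1.2 > s.2.2.2 then (s1.1, s1.2, s1.1, s1.2) else (s1.1, s1.2, s.2.2.1, s.2.2.2)

def majority_label_train_py_alt (rows : List (List (String × String))) : String :=
  let labels := PySem.List.sorted (rows.foldl (fun acc r =>
      if (PySem.Dict.mk r).get? "split" == some "train"
      then acc ++ [(PySem.Dict.mk r).getD "label" ""] else acc) []) (fun x => x) false
  match labels with
  | [] => ""   -- raise RuntimeError("No train rows in fixture dataset"): outside Pre_
  | l0 :: _ => (labels.foldl pvStep (l0, 0, l0, 0)).2.2.1

-- ===== PRECONDITION & SPEC =====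
-- Pre_ excludes exactly the crashes of A: no train row (RuntimeError) and a train row
-- without a "label" key (KeyError).
def Pre_majority_label_train_py (rows : List (List (String × String))) : Prop :=
  (∃ r ∈ rows, (PySem.Dict.mk r).get? "split" = some "train") ∧
  (∀ r ∈ rows, (PySem.Dict.mk r).get? "split" = some "train" →
      (PySem.Dict.mk r).contains "label" = true)
instance (rows : List (List (String × String))) : Decidable (Pre_majority_label_train_py rows) := by
  unfold Pre_majority_label_train_py; infer_instance

def pvWitness_majority_label_train_py : (List (List (String × String))) :=
  [[("split", "train"), ("label", "a")]]

def Spec_majority_label_train_py (rows : List (List (String × String))) (out : String) : Prop := out = majority_label_train_py_alt rows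
instance (rows : List (List (String × String))) (out : String) : Decidable (Spec_majority_label_train_py rows out) := by unfold Spec_majority_label_train_py; infer_instance

-- ===== CLAIM (what is proved, stated in full; the proofs are below) =====
def Claim_equal_majority_label_train_py : Prop := ∀ (rows : List (List (String × String))), Dom_majority_label_train_py rows → Pre_majority_label_train_py rows → Spec_majority_label_train_py rows (majority_label_train_py rows)

-- ===== LEMMAS AND PROOFS =====

-- the label being claimed: a most frequent element of L, least such
def pvIsBest (L : List String) (m : String) : Prop :=
  m ∈ L ∧ (∀ y ∈ L, L.count y ≤ L.count m) ∧ (∀ y ∈ L, L.count y = L.count m → m ≤ y)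

lemma pvIsBest_unique {L : List String} {m m' : String}
    (h : pvIsBest L m) (h' : pvIsBest L m') : m = m' := by
  obtain ⟨hm, hmax, hmin⟩ := h
  obtain ⟨hm', hmax', hmin'⟩ := h'
  have hc : L.count m = L.count m' := le_antisymm (hmax' m hm) (hmax m' hm')
  exact le_antisymm (hmin m' hm' hc.symm) (hmin' m hm hc)

-- one step of the scan preserves the invariant (P sorted below x)
lemma pvStep_inv (P : List String) (x cur best : String) (run bR : Int)
    (hxall : ∀ a ∈ P, a ≤ x)
    (hcur : cur ∈ P) (hcurmax : ∀ a ∈ P, a ≤ cur) (hrun : run = (P.count cur : Int))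
    (hbest : pvIsBest P best) (hbR : bR = (P.count best : Int)) :
    (pvStep (cur, run, best, bR) x).1 ∈ P ++ [x] ∧
    (∀ a ∈ P ++ [x], a ≤ (pvStep (cur, run, best, bR) x).1) ∧
    (pvStep (cur, run, best, bR) x).2.1 = ((P ++ [x]).count (pvStep (cur, run, best, bR) x).1 : Int) ∧
    pvIsBest (P ++ [x]) (pvStep (cur, run, best, bR) x).2.2.1 ∧
    (pvStep (cur, run, best, bR) x).2.2.2 = ((P ++ [x]).count (pvStep (cur, run, best, bR) x).2.2.1 : Int) := by
  obtain ⟨hbmem, hbmax, hbmin⟩ := hbest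
  have hcount : ∀ y : String, (P ++ [x]).count y = P.count y + (if x == y then 1 else 0) := by
    intro y; simp [List.count_append, List.count_singleton]
  have hmem' : ∀ y : String, y ∈ P ++ [x] → y ≠ x → y ∈ P := by
    intro y hy hne
    rcases List.mem_append.1 hy with h | h
    · exact h
    · exact absurd (List.mem_singleton.1 h) hne
  by_cases hx : x = cur
  · subst hx
    by_cases h2 : run + 1 > bR
    · have hst : pvStep (x, run, best, bR) x = (x, run + 1, x, run + 1) := by
        simp [pvStep, h2]
      rw [hst]
      have hbRrun : (P.count best : Int) ≤ P.count x := by omega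
      refine ⟨List.mem_append_right _ (List.mem_singleton_self x), ?_, ?_, ⟨List.mem_append_right _ (List.mem_singleton_self x), ?_, ?_⟩, ?_⟩
      · intro a ha
        rcases List.mem_append.1 ha with h | h
        · exact hxall a h
        · exact le_of_eq (List.mem_singleton.1 h)
      · rw [hcount x]; simp [hrun]
      · intro y hy
        by_cases hyx : y = x
        · exact le_of_eq (by rw [hyx])
        · have hyP : y ∈ P := hmem' y hy hyx
          rw [hcount y, hcount x]
          have h1 := hbmax y hyP
          have : (x == y) = false := beq_eq_false_iff_ne.2 (fun e => hyx e.symm)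
          simp [this]
          omega
      · intro y hy hc
        by_cases hyx : y = x
        · exact le_of_eq hyx.symm
        · exfalso
          have hyP : y ∈ P := hmem' y hy hyx
          rw [hcount y, hcount x] at hc
          have : (x == y) = false := beq_eq_false_iff_ne.2 (fun e => hyx e.symm)
          simp [this] at hc
          have h1 := hbmax y hyP
          omega
      · rw [hcount x]; simp [hrun]
    · have hbne : best ≠ x := by
        intro e; subst e; omega
      have hxb : (x == best) = false := beq_eq_false_iff_ne.2 (fun e => hbne e.symm)
      have hst : pvStep (x, run, best, bR) x = (x, run + 1, best, bR) := by
        simp [pvStep, h2]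
      rw [hst]
      have hcb : (P ++ [x]).count best = P.count best := by rw [hcount best]; simp [hxb]
      refine ⟨List.mem_append_right _ (List.mem_singleton_self x), ?_, ?_, ⟨List.mem_append_left _ hbmem, ?_, ?_⟩, ?_⟩
      · intro a ha
        rcases List.mem_append.1 ha with h | h
        · exact hxall a h
        · exact le_of_eq (List.mem_singleton.1 h)
      · rw [hcount x]; simp [hrun]
      · intro y hy
        rw [hcb]
        by_cases hyx : y = x
        · subst hyx
          rw [hcount y]
          simp only [beq_self_eq_true, if_true]
          omega
        · have hyP : y ∈ P := hmem' y hy hyx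
          rw [hcount y]
          have : (x == y) = false := beq_eq_false_iff_ne.2 (fun e => hyx e.symm)
          simp [this]
          exact hbmax y hyP
      · intro y hy hc
        rw [hcb] at hc
        by_cases hyx : y = x
        · subst hyx; exact hxall best hbmem
        · have hyP : y ∈ P := hmem' y hy hyx
          rw [hcount y] at hc
          have : (x == y) = false := beq_eq_false_iff_ne.2 (fun e => hyx e.symm)
          simp [this] at hc
          exact hbmin y hyP hc
      · rw [hcb]; exact hbR
  · have hbeq : (x == cur) = false := beq_eq_false_iff_ne.2 hx
    have hxP : x ∉ P := fun hxp => hx (le_antisymm (hcurmax x hxp) (hxall cur hcur))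
    have hcnt0 : P.count x = 0 := List.count_eq_zero.2 hxP
    have hposb : 0 < P.count best := List.count_pos_iff.2 hbmem
    have hst : pvStep (cur, run, best, bR) x = (x, 1, best, bR) := by
      simp only [pvStep, hbeq]
      simp only [Bool.false_eq_true, if_false]
      rw [if_neg (by omega : ¬ ((1 : Int) > bR))]
    rw [hst]
    have hbnex : best ≠ x := fun e => hxP (e ▸ hbmem)
    have hxb : (x == best) = false := beq_eq_false_iff_ne.2 (fun e => hbnex e.symm)
    have hcb : (P ++ [x]).count best = P.count best := by rw [hcount best]; simp [hxb]
    refine ⟨List.mem_append_right _ (List.mem_singleton_self x), ?_, ?_, ⟨List.mem_append_left _ hbmem, ?_, ?_⟩, ?_⟩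
    · intro a ha
      rcases List.mem_append.1 ha with h | h
      · exact hxall a h
      · exact le_of_eq (List.mem_singleton.1 h)
    · rw [hcount x]; simp [hcnt0]
    · intro y hy
      rw [hcb]
      by_cases hyx : y = x
      · subst hyx
        rw [hcount y]
        simp only [beq_self_eq_true, if_true, hcnt0]
        omega
      · have hyP : y ∈ P := hmem' y hy hyx
        rw [hcount y]
        have : (x == y) = false := beq_eq_false_iff_ne.2 (fun e => hyx e.symm)
        simp [this]
        exact hbmax y hyP
    · intro y hy hc
      rw [hcb] at hc
      by_cases hyx : y = x
      · subst hyx; exact hxall best hbmem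
      · have hyP : y ∈ P := hmem' y hy hyx
        rw [hcount y] at hc
        have : (x == y) = false := beq_eq_false_iff_ne.2 (fun e => hyx e.symm)
        simp [this] at hc
        exact hbmin y hyP hc
    · rw [hcb]; exact hbR

-- invariant of Source B's scan over a sorted (Pairwise ≤) nonempty list
lemma pvScan_inv (P : List String) (l0 : String) (hP : P ≠ [])
    (hs : P.Pairwise (· ≤ ·)) :
    (P.foldl pvStep (l0, 0, l0, 0)).1 ∈ P ∧
    (∀ a ∈ P, a ≤ (P.foldl pvStep (l0, 0, l0, 0)).1) ∧
    (P.foldl pvStep (l0, 0, l0, 0)).2.1 = (P.count (P.foldl pvStep (l0, 0, l0, 0)).1 : Int) ∧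
    pvIsBest P (P.foldl pvStep (l0, 0, l0, 0)).2.2.1 ∧
    (P.foldl pvStep (l0, 0, l0, 0)).2.2.2 = (P.count (P.foldl pvStep (l0, 0, l0, 0)).2.2.1 : Int) := by
  induction P using List.reverseRecOn with
  | nil => exact absurd rfl hP
  | append_singleton P x ih =>
    rw [List.pairwise_append] at hs
    obtain ⟨hsP, -, hxall'⟩ := hs
    have hxall : ∀ a ∈ P, a ≤ x := fun a ha => hxall' a ha x (List.mem_singleton_self x)
    rw [List.foldl_append, List.foldl_cons, List.foldl_nil]
    by_cases hPnil : P = []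
    · subst hPnil
      simp only [List.foldl_nil, List.nil_append]
      have hst : pvStep (l0, 0, l0, 0) x = (x, 1, x, 1) := by
        by_cases hx : x = l0
        · subst hx; simp [pvStep]
        · simp [pvStep, beq_eq_false_iff_ne.2 hx]
      rw [hst]
      refine ⟨List.mem_singleton_self x, ?_, by simp, ⟨List.mem_singleton_self x, ?_, ?_⟩, by simp⟩
      · intro a ha; rw [List.mem_singleton] at ha; exact le_of_eq ha
      · intro y hy; rw [List.mem_singleton] at hy; subst hy; exact le_rfl
      · intro y hy _; rw [List.mem_singleton] at hy; exact le_of_eq hy.symm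
    · obtain ⟨C1, C2, C3, hbest, C5⟩ := ih hPnil hsP
      exact pvStep_inv P x _ _ _ _ hxall C1 C2 C3 hbest C5

-- A's branch computes the least most-frequent label
lemma pvA_isBest (L : List String) (hL : L ≠ []) :
    pvIsBest L
      ((PySem.List.sorted
        ((PySem.Dict.counter L).items.foldl
          (fun acc p => if p.2 == (PySem.List.max? (PySem.Dict.counter L).values (fun v => v)).getD 0
                        then acc ++ [p.1] else acc) [])
        (fun x => x) false).headD "") := by
  have hvals : (PySem.Dict.counter L).values
      = (PySem.Set.ofList L).map (fun k => ((L.count k : Nat) : Int)) := by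
    show ((PySem.Dict.counter L).items.map Prod.snd) = _
    rw [PySem.Dict.items_counter, List.map_map]
    rfl
  obtain ⟨x0, hx0⟩ := List.exists_mem_of_ne_nil L hL
  cases h : PySem.List.max? (PySem.Dict.counter L).values (fun v => v) with
  | none =>
    rw [PySem.List.max?_eq_none_iff, hvals, List.map_eq_nil_iff] at h
    exact absurd (h ▸ (PySem.Set.mem_ofList L _).2 hx0) (List.not_mem_nil)
  | some m0 =>
    show pvIsBest L
      ((PySem.List.sorted
        ((PySem.Dict.counter L).items.foldl
          (fun acc p => if p.2 == m0 then acc ++ [p.1] else acc) [])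
        (fun x => x) false).headD "")
    have heq : List.foldl (fun acc (p : String × Int) => if p.2 == m0 then acc ++ [p.1] else acc)
        [] (PySem.Dict.counter L).items
        = List.map Prod.fst (List.filter (fun p : String × Int => p.2 == m0) (PySem.Dict.counter L).items) := by
      rw [PySem.List.foldl_append_if (fun p : String × Int => p.2 == m0) Prod.fst, List.nil_append]
    simp only [heq]
    rw [PySem.Dict.items_counter, List.filter_map, List.map_map]
    have hbase : (Prod.fst ∘ fun k => (k, ((L.count k : Nat) : Int))) = fun k : String => k := rfl
    rw [hbase]
    have hub : ∀ y ∈ L, ((L.count y : Nat) : Int) ≤ m0 := by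
      intro y hy
      exact PySem.List.max?_isMax h _ (hvals ▸ List.mem_map.2 ⟨y, (PySem.Set.mem_ofList L y).2 hy, rfl⟩)
    obtain ⟨k0, hk0s, hk0c⟩ : ∃ k ∈ PySem.Set.ofList L, ((L.count k : Nat) : Int) = m0 := by
      have := PySem.List.max?_mem h
      rw [hvals] at this
      obtain ⟨k, hk, hkc⟩ := List.mem_map.1 this
      exact ⟨k, hk, hkc⟩
    have hk0f : k0 ∈ List.map (fun k : String => k)
        (List.filter ((fun q : String × Int => q.2 == m0) ∘ fun k => (k, ((L.count k : Nat) : Int)))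
          (PySem.Set.ofList L)) := by
      simp only [List.map_id_fun', id_eq, Function.comp_def, List.mem_filter]
      exact ⟨hk0s, by simp [hk0c]⟩
    cases hC : PySem.List.sorted (List.map (fun k : String => k)
        (List.filter ((fun q : String × Int => q.2 == m0) ∘ fun k => (k, ((L.count k : Nat) : Int)))
          (PySem.Set.ofList L))) (fun x => x) false with
    | nil =>
      rw [PySem.List.sorted_eq_nil_iff] at hC
      exact absurd (hC ▸ hk0f) (List.not_mem_nil)
    | cons c t =>
      have hcmem : c ∈ List.map (fun k : String => k)
          (List.filter ((fun q : String × Int => q.2 == m0) ∘ fun k => (k, ((L.count k : Nat) : Int)))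
            (PySem.Set.ofList L)) := by
        rw [← PySem.List.mem_sorted _ (fun x : String => x) false, hC]
        exact List.mem_cons_self
      have hcmin := PySem.List.key_head_sorted_le _ (fun x : String => x) hC
      simp only [List.map_id_fun', id_eq, Function.comp_def, List.mem_filter] at hcmem
      obtain ⟨hcs, hcc⟩ := hcmem
      have hcc' : ((L.count c : Nat) : Int) = m0 := by simpa using hcc
      simp only [List.headD_cons]
      refine ⟨(PySem.Set.mem_ofList L c).1 hcs, fun y hy => ?_, fun y hy hyc => ?_⟩
      · have := hub y hy
        rw [← hcc'] at this
        exact_mod_cast this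
      · refine hcmin y ?_
        simp only [List.map_id_fun', id_eq, Function.comp_def, List.mem_filter]
        exact ⟨(PySem.Set.mem_ofList L y).2 hy, by simp [hyc, hcc']⟩

lemma pvIsBest_perm {S L : List String} (hp : S.Perm L) {m : String}
    (h : pvIsBest S m) : pvIsBest L m := by
  obtain ⟨hm, hmax, hmin⟩ := h
  refine ⟨hp.mem_iff.1 hm, fun y hy => ?_, fun y hy hc => ?_⟩
  · rw [← hp.count_eq, ← hp.count_eq]; exact hmax y (hp.mem_iff.2 hy)
  · exact hmin y (hp.mem_iff.2 hy) (by rw [hp.count_eq, hp.count_eq]; exact hc)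

lemma pvB_isBest (L : List String) (hL : L ≠ []) :
    pvIsBest L
      (match PySem.List.sorted L (fun x => x) false with
       | [] => ""
       | l0 :: _ => ((PySem.List.sorted L (fun x => x) false).foldl pvStep (l0, 0, l0, 0)).2.2.1) := by
  cases hS : PySem.List.sorted L (fun x => x) false with
  | nil => exact absurd ((PySem.List.sorted_eq_nil_iff L _ _).1 hS) hL
  | cons l0 t =>
    have hp : (PySem.List.sorted L (fun x => x) false).Perm L := PySem.List.sorted_perm L _ _
    have hne : PySem.List.sorted L (fun x => x) false ≠ [] := by rw [hS]; exact List.cons_ne_nil _ _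
    have hpw : (PySem.List.sorted L (fun x => x) false).Pairwise (· ≤ ·) :=
      PySem.List.sorted_pairwise L (fun x => x)
    have inv := pvScan_inv (PySem.List.sorted L (fun x => x) false) l0 hne hpw
    rw [hS] at inv hp
    simpa using pvIsBest_perm hp inv.2.2.2.1

-- ===== VERDICT (by name: the statement is the Claim_ definition above) =====
theorem majority_label_train_py_spec : Claim_equal_majority_label_train_py := by
  intro rows _ hpre
  obtain ⟨⟨r0, hr0, hr0t⟩, _⟩ := hpre
  show majority_label_train_py rows = majority_label_train_py_alt rows
  simp only [majority_label_train_py, majority_label_train_py_alt]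
  set L := rows.foldl (fun acc r =>
      if (PySem.Dict.mk r).get? "split" == some "train"
      then acc ++ [(PySem.Dict.mk r).getD "label" ""] else acc) ([] : List String) with hLdef
  have hmem : (PySem.Dict.mk r0).getD "label" "" ∈ L := by
    rw [hLdef, PySem.List.foldl_append_if]
    simp only [List.nil_append, List.mem_map]
    exact ⟨r0, List.mem_filter.2 ⟨hr0, by simp [hr0t]⟩, rfl⟩
  have hL : L ≠ [] := List.ne_nil_of_mem hmem
  have hitems : ¬ ((PySem.Dict.counter L).items = []) := by
    rw [PySem.Dict.items_counter]
    simp only [List.map_eq_nil_iff]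
    intro h
    exact absurd (h ▸ (PySem.Set.mem_ofList L _).2 hmem) (List.not_mem_nil)
  rw [if_neg hitems]
  exact pvIsBest_unique (pvA_isBest L hL) (pvB_isBest L hL)
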